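-- pv_equiv track=rewrite | github.com/datacommonsorg/data | scripts/un_data/energy/process.py | get_stat_var_id
-- ===== SOURCE A (Python) =====
-- def add_property_value_name(pv_dict, prop: str, name_list, ignore_list=None):
--     if prop not in pv_dict:
--         return
--     value = pv_dict[prop]
--     pv_dict.pop(prop)
--     if value is None:
--         return
--     if ignore_list is not None and value in ignore_list:
--         return
--     # strip out any prefix such as 'dcs:' or 'dcid:' or 'schema:'
--     prefix_len = value.find(':') + 1
--     name_list.append(value[prefix_len:])
--
-- def get_stat_var_id(sv_pv) -> str:
--     # <mqualifier>_<statype>_<measuredProp>_<PopulationType>_<constraint1>_<constraint2>_...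
--     pv = dict(sv_pv)
--     ids = []
--
--     # Add default properties
--     add_property_value_name(pv, 'measurementQualifier', ids)
--     add_property_value_name(pv, 'statType', ids, ['dcs:measuredValue'])
--     add_property_value_name(pv, 'measuredProperty', ids)
--     add_property_value_name(pv, 'populationType', ids)
--     pv.pop('typeOf')
--
--     # Add the remaining properties in sorted order
--     for prop in sorted(pv.keys()):
--         add_property_value_name(pv, prop, ids)
--
--     return '_'.join(ids)
-- ===== SOURCE B (Python) =====
-- _RANK = {'measurementQualifier': '0', 'statType': '1',
--          'measuredProperty': '2', 'populationType': '3'}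
--
-- def get_stat_var_id(sv_pv) -> str:
--     # Schwartzian transform: decorate each item with a one-character rank
--     # prefix, sort all items ONCE by that composite key, emit in one pass.
--     pv = dict(sv_pv)
--     del pv['typeOf']
--     items = sorted(pv.items(), key=lambda kv: _RANK.get(kv[0], '4') + kv[0])
--     parts = []
--     for k, v in items:
--         if v is None or (k == 'statType' and v == 'dcs:measuredValue'):
--             continue
--         parts.append(v[v.find(':') + 1:])
--     return '_'.join(parts)
-- ===== Notes on version B (the rewrite author's own statement) =====
-- stated objective: alternative
-- what changed: B replaces A's stateful pop-as-you-go construction (mutating the dict five times, then looping over the sorted leftover keys) with a Schwartzian transform: each item is decorated with a one-character rank prefix ('0'-'3' for the four priority keys, '4' otherwise), ALL items are sorted once by that composite string key, and the ids are emitted in a single read-only pass; the fixed-priority-then-sorted-rest order falls out of the one sort.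
import Mathlib
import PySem

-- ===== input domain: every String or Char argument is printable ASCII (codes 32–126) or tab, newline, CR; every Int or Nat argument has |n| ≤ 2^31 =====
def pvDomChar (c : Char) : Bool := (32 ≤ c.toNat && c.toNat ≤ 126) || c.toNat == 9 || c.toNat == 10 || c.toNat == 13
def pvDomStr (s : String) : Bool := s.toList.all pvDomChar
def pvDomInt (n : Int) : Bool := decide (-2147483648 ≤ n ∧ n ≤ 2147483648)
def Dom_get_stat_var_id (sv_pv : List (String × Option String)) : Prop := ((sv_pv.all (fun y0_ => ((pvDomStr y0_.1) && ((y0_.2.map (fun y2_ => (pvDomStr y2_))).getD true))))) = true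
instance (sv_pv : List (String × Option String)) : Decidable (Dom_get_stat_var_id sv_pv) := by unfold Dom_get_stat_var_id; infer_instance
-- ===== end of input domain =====

-- B replaces A's staged pop-as-you-go construction with a Schwartzian transform: every item is
-- decorated with a one-character rank prefix, ALL items are sorted once by that composite string
-- key, and the ids are emitted in one read-only pass. Equivalence of the return value is proved on
-- inputs with a 'typeOf' key (on all others A raises KeyError). A mutates only its private dict
-- copy, so no visible side effects.


-- ===== PORT A (ports and their helpers; B's port below) =====
def pvStrip (v : String) : String := PySem.Str.slice v (some (PySem.Str.find v ":" + 1)) none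

def addPV (pv : PySem.Dict String (Option String)) (prop : String) (ids : List String)
    (ignore : Option (List String)) : PySem.Dict String (Option String) × List String :=
  match pv.get? prop with
  | none => (pv, ids)
  | some value =>
    let pv' := pv.erase prop
    match value with
    | none => (pv', ids)
    | some v =>
      match ignore with
      | some ig => if v ∈ ig then (pv', ids) else (pv', ids ++ [pvStrip v])
      | none => (pv', ids ++ [pvStrip v])

def get_stat_var_id (sv_pv : List (String × Option String)) : String :=
  let pv := PySem.Dict.ofList sv_pv
  let st1 := addPV pv "measurementQualifier" [] none
  let st2 := addPV st1.1 "statType" st1.2 (some ["dcs:measuredValue"])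
  let st3 := addPV st2.1 "measuredProperty" st2.2 none
  let st4 := addPV st3.1 "populationType" st3.2 none
  match st4.1.pop? "typeOf" with
  | none => ""
  | some (_, pv5) =>
    let stF := (PySem.List.sorted pv5.keys (fun k => k) false).foldl
        (fun (st : PySem.Dict String (Option String) × List String) prop => addPV st.1 prop st.2 none)
        (pv5, st4.2)
    PySem.Str.join "_" stF.2

-- ===== PORT B =====
-- module-level `_RANK` dict of Source B
def pvRankD : PySem.Dict String String :=
  PySem.Dict.ofList [("measurementQualifier", "0"), ("statType", "1"),
                     ("measuredProperty", "2"), ("populationType", "3")]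

def get_stat_var_id_alt (sv_pv : List (String × Option String)) : String :=
  let pv := PySem.Dict.ofList sv_pv
  match pv.pop? "typeOf" with          -- `del pv['typeOf']` (KeyError if absent, outside Pre_)
  | none => ""
  | some (_, pv') =>
    let items := PySem.List.sorted pv'.items (fun kv => pvRankD.getD kv.1 "4" ++ kv.1) false
    let parts := items.foldl (fun parts kv =>
      match kv.2 with
      | none => parts
      | some v =>
        if kv.1 == "statType" && v == "dcs:measuredValue" then parts
        else parts ++ [pvStrip v]) []
    PySem.Str.join "_" parts

-- ===== PRECONDITION & SPEC =====
-- Pre_ excludes exactly the inputs without a 'typeOf' key, on which both A and B raise KeyError.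
def Pre_get_stat_var_id (sv_pv : List (String × Option String)) : Prop :=
  "typeOf" ∈ sv_pv.map Prod.fst
instance (sv_pv : List (String × Option String)) : Decidable (Pre_get_stat_var_id sv_pv) := by
  unfold Pre_get_stat_var_id; infer_instance
def pvWitness_get_stat_var_id : (List (String × Option String)) :=
  [("typeOf", some "dcs:Person"), ("measuredProperty", some "dcs:count"), ("age", some "dcs:Years10")]

def Spec_get_stat_var_id (sv_pv : List (String × Option String)) (out : String) : Prop :=
  out = get_stat_var_id_alt sv_pv
instance (sv_pv : List (String × Option String)) (out : String) : Decidable (Spec_get_stat_var_id sv_pv out) := by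
  unfold Spec_get_stat_var_id; infer_instance

-- ===== CLAIM (what is proved, stated in full; the proofs are below) =====
def Claim_equal_get_stat_var_id : Prop := ∀ (sv_pv : List (String × Option String)), Dom_get_stat_var_id sv_pv → Pre_get_stat_var_id sv_pv → Spec_get_stat_var_id sv_pv (get_stat_var_id sv_pv)

-- ===== LEMMAS AND PROOFS =====

-- what `add_property_value_name` appends, as a function of the dict before the call
def emitA (d : PySem.Dict String (Option String)) (k : String) (ignore : Option (List String)) : List String :=
  match d.get? k with
  | none => []
  | some none => []
  | some (some v) =>
    match ignore with
    | some ig => if v ∈ ig then [] else [pvStrip v]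
    | none => [pvStrip v]

-- what B's emit pass appends for one sorted item
def emitI (kv : String × Option String) : List String :=
  match kv.2 with
  | none => []
  | some v => if kv.1 == "statType" && v == "dcs:measuredValue" then [] else [pvStrip v]

-- B's composite sort key, as a function of the key alone
def ckey (k : String) : String := pvRankD.getD k "4" ++ k

def itemOf (d : PySem.Dict String (Option String)) (k : String) : String × Option String :=
  (k, d.getD k none)

theorem erase_not_contains (d : PySem.Dict String (Option String)) (k : String)
    (h : d.get? k = none) : d.erase k = d := by
  apply PySem.Dict.ext
  simp only [PySem.Dict.erase]
  simp only [PySem.Dict.get?, Option.map_eq_none_iff, List.find?_eq_none] at h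
  exact List.filter_eq_self.2 (fun p hp => by simpa using h p hp)

theorem get?_erase_of_ne (d : PySem.Dict String (Option String)) (k k' : String) (h : k' ≠ k) :
    (d.erase k).get? k' = d.get? k' := by
  simp only [PySem.Dict.erase, PySem.Dict.get?]
  congr 1
  induction d.items with
  | nil => rfl
  | cons p t ih =>
    by_cases hk : p.1 = k
    · simp [hk, Ne.symm h, ih]
    · by_cases hk' : p.1 = k'
      · simp [hk', h]
      · have hfc : List.filter (fun q => !q.1 == k) (p :: t) = p :: List.filter (fun q => !q.1 == k) t := by
          simp [hk]
        rw [hfc, List.find?_cons, List.find?_cons]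
        simp [ih]

theorem keys_erase (d : PySem.Dict String (Option String)) (k : String) :
    (d.erase k).keys = d.keys.filter (fun x => !(x == k)) := by
  simp only [PySem.Dict.erase, PySem.Dict.keys, List.filter_map]
  rfl

theorem addPV_eq (d : PySem.Dict String (Option String)) (k : String) (ids : List String)
    (ig : Option (List String)) : addPV d k ids ig = (d.erase k, ids ++ emitA d k ig) := by
  unfold addPV emitA
  cases h : d.get? k with
  | none => simp [erase_not_contains d k h]
  | some value =>
    cases value with
    | none => simp
    | some v =>
      cases ig with
      | none => simp
      | some ig => by_cases hv : v ∈ ig <;> simp [hv]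

theorem mem_keys_ofList (ps : List (String × Option String)) (k : String) :
    k ∈ (PySem.Dict.ofList ps).keys ↔ k ∈ ps.map Prod.fst := by
  show k ∈ (PySem.Dict.empty.update ps).keys ↔ _
  unfold PySem.Dict.update
  rw [PySem.Dict.keys_foldl_insert_key ps Prod.fst (fun _ x => x.2) PySem.Dict.empty]
  show k ∈ PySem.Set.update [] (ps.map Prod.fst) ↔ _
  rw [show PySem.Set.update [] (ps.map Prod.fst) = PySem.Set.ofList (ps.map Prod.fst) from rfl]
  exact PySem.Set.mem_ofList _ _

theorem emitA_congr (d d' : PySem.Dict String (Option String)) (k : String) (ig : Option (List String))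
    (h : d.get? k = d'.get? k) : emitA d k ig = emitA d' k ig := by
  unfold emitA; rw [h]

theorem loop_emit (L : List String) (d : PySem.Dict String (Option String)) (ids : List String)
    (hL : L.Nodup) :
    (L.foldl (fun (st : PySem.Dict String (Option String) × List String) prop =>
        (st.1.erase prop, st.2 ++ emitA st.1 prop none)) (d, ids)).2
      = ids ++ L.flatMap (fun k => emitA d k none) := by
  induction L generalizing d ids with
  | nil => simp
  | cons k t ih =>
    rw [List.foldl_cons]
    have hnd := (List.nodup_cons.1 hL)
    rw [show ((d, ids).1.erase k, (d, ids).2 ++ emitA (d, ids).1 k none)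
          = (d.erase k, ids ++ emitA d k none) from rfl]
    rw [ih (d.erase k) _ hnd.2]
    rw [List.flatMap_cons, ← List.append_assoc]
    congr 1
    exact List.flatMap_congr (fun x hx => emitA_congr _ _ _ _
      (get?_erase_of_ne d k x (fun he => hnd.1 (he ▸ hx))))

-- first-match lookup of a key that occurs in a key-nodup item list returns that item's value
theorem get?_mk_of_mem_nodup (l : List (String × Option String)) (kv : String × Option String)
    (h : (l.map Prod.fst).Nodup) (hm : kv ∈ l) :
    (PySem.Dict.mk l).get? kv.1 = some kv.2 := by
  induction l with
  | nil => cases hm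
  | cons p t ih =>
    rw [PySem.Dict.get?_mk_cons]
    rcases List.mem_cons.1 hm with rfl | hm
    · simp
    · have h' : p.1 ∉ t.map Prod.fst ∧ (t.map Prod.fst).Nodup := by
        simpa [List.nodup_cons] using h
      have hne : p.1 ≠ kv.1 := by
        intro he
        exact h'.1 (he ▸ (List.mem_map_of_mem (f := Prod.fst) hm))
      simp only [beq_iff_eq, hne, if_false]
      exact ih h'.2 hm

theorem get?_of_mem_items (d : PySem.Dict String (Option String)) (kv : String × Option String)
    (h : d.keys.Nodup) (hm : kv ∈ d.items) : d.get? kv.1 = some kv.2 :=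
  get?_mk_of_mem_nodup d.items kv h hm

-- a key-nodup dict's item list is its key list decorated with the looked-up values
theorem items_eq_map_itemOf (d : PySem.Dict String (Option String)) (h : d.keys.Nodup) :
    d.items = d.keys.map (itemOf d) := by
  show d.items = (d.items.map Prod.fst).map (itemOf d)
  rw [List.map_map]
  conv_lhs => rw [← List.map_id d.items]
  refine List.map_congr_left (fun kv hm => ?_)
  have hg := get?_of_mem_items d kv h hm
  simp [itemOf, PySem.Dict.getD_eq_get?_getD, hg]

theorem mem_keys_iff_contains (d : PySem.Dict String (Option String)) (k : String) :
    d.contains k = true ↔ k ∈ d.keys := by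
  rw [PySem.Dict.contains_eq_isSome_get?, Option.isSome_iff_ne_none]
  constructor
  · intro hne
    by_contra hk
    exact hne ((PySem.Dict.get?_eq_none_iff_not_mem_keys d k).2 hk)
  · intro hk hnone
    exact (PySem.Dict.get?_eq_none_iff_not_mem_keys d k).1 hnone hk

-- the four priority keys, in emission order
def pvFixedL : List String :=
  ["measurementQualifier", "statType", "measuredProperty", "populationType"]

theorem pvRankD_mk : pvRankD = PySem.Dict.mk
    [("measurementQualifier", "0"), ("statType", "1"),
     ("measuredProperty", "2"), ("populationType", "3")] := by decide

theorem ckey_rest (k : String) (h1 : k ≠ "measurementQualifier") (h2 : k ≠ "statType")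
    (h3 : k ≠ "measuredProperty") (h4 : k ≠ "populationType") : ckey k = "4" ++ k := by
  unfold ckey
  rw [pvRankD_mk, PySem.Dict.getD_eq_get?_getD]
  simp [PySem.Dict.get?, Ne.symm h1, Ne.symm h2, Ne.symm h3, Ne.symm h4]

theorem ckey_fix_pairwise : List.Pairwise (fun a b => ckey a < ckey b) pvFixedL := by
  refine List.pairwise_cons.2 ⟨?_, List.pairwise_cons.2 ⟨?_, List.pairwise_cons.2 ⟨?_, ?_⟩⟩⟩
  · rintro b hb
    rcases (by simpa using hb : b = "statType" ∨ b = "measuredProperty" ∨ b = "populationType")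
      with rfl | rfl | rfl <;> (rw [String.lt_iff_toList_lt]; decide)
  · rintro b hb
    rcases (by simpa using hb : b = "measuredProperty" ∨ b = "populationType")
      with rfl | rfl <;> (rw [String.lt_iff_toList_lt]; decide)
  · rintro b hb
    rcases (by simpa using hb : b = "populationType") with rfl
    rw [String.lt_iff_toList_lt]; decide
  · simp

theorem ckey_fix_lt_rest (f : String) (hf : f ∈ pvFixedL) (r : String)
    (hr : ckey r = "4" ++ r) : ckey f < ckey r := by
  have h4 : ("4" : String).toList = ['4'] := by decide
  rw [hr, String.lt_iff_toList_lt, String.toList_append, h4]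
  rcases (by simpa [pvFixedL] using hf :
      f = "measurementQualifier" ∨ f = "statType" ∨ f = "measuredProperty" ∨ f = "populationType")
    with rfl | rfl | rfl | rfl
  · rw [show (ckey "measurementQualifier").toList = '0' :: "measurementQualifier".toList by decide]
    exact List.Lex.rel (by decide)
  · rw [show (ckey "statType").toList = '1' :: "statType".toList by decide]
    exact List.Lex.rel (by decide)
  · rw [show (ckey "measuredProperty").toList = '2' :: "measuredProperty".toList by decide]
    exact List.Lex.rel (by decide)
  · rw [show (ckey "populationType").toList = '3' :: "populationType".toList by decide]
    exact List.Lex.rel (by decide)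

theorem ckey_rr (a b : String) (ha : ckey a = "4" ++ a) (hb : ckey b = "4" ++ b) (h : a < b) :
    ckey a < ckey b := by
  rw [ha, hb, String.lt_iff_toList_lt, String.toList_append, String.toList_append]
  show ('4' :: a.toList) < ('4' :: b.toList)
  exact List.Lex.cons (String.lt_iff_toList_lt.1 h)

theorem flatMap_filter_of_nil (l : List α) (p : α → Bool) (f : α → List β)
    (h : ∀ x ∈ l, p x = false → f x = []) : (l.filter p).flatMap f = l.flatMap f := by
  induction l with
  | nil => rfl
  | cons a t ih =>
    rw [List.filter_cons]
    by_cases hp : p a = true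
    · simp only [hp, if_true, List.flatMap_cons]
      rw [ih (fun x hx hpx => h x (List.mem_cons_of_mem _ hx) hpx)]
    · have hf := h a List.mem_cons_self (by simpa using hp)
      simp [hp, List.flatMap_cons, hf, ih (fun x hx hpx => h x (List.mem_cons_of_mem _ hx) hpx)]

theorem emitI_absent (d1 : PySem.Dict String (Option String)) (k : String)
    (h : d1.get? k = none) : emitI (itemOf d1 k) = [] := by
  unfold emitI itemOf
  rw [PySem.Dict.getD_eq_get?_getD, h]
  rfl

theorem emitI_eq_nonstat (d0 : PySem.Dict String (Option String)) (x : String)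
    (hx : x ≠ "typeOf") (hst : x ≠ "statType") :
    emitI (itemOf (d0.erase "typeOf") x) = emitA d0 x none := by
  unfold emitI itemOf emitA
  rw [PySem.Dict.getD_eq_get?_getD, get?_erase_of_ne d0 "typeOf" x hx]
  cases d0.get? x with
  | none => rfl
  | some w =>
    cases w with
    | none => rfl
    | some v => simp [hst]

theorem emitI_eq_stat (d0 : PySem.Dict String (Option String)) :
    emitI (itemOf (d0.erase "typeOf") "statType")
      = emitA d0 "statType" (some ["dcs:measuredValue"]) := by
  unfold emitI itemOf emitA
  rw [PySem.Dict.getD_eq_get?_getD, get?_erase_of_ne d0 "typeOf" "statType" (by decide)]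
  cases d0.get? "statType" with
  | none => rfl
  | some w =>
    cases w with
    | none => rfl
    | some v => by_cases hv : v = "dcs:measuredValue" <;> simp [hv]

-- ===== VERDICT (by name: the statement is the Claim_ definition above) =====
theorem get_stat_var_id_spec : Claim_equal_get_stat_var_id := by
  intro sv_pv _ hPre
  unfold Pre_get_stat_var_id at hPre
  unfold Spec_get_stat_var_id
  set d0 := PySem.Dict.ofList sv_pv with hd0
  have hnd0 : d0.keys.Nodup := PySem.Dict.nodup_keys_ofList sv_pv
  have hT : "typeOf" ∈ d0.keys := (mem_keys_ofList sv_pv "typeOf").2 hPre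
  obtain ⟨val, hval⟩ : ∃ v, d0.get? "typeOf" = some v := by
    cases h : d0.get? "typeOf" with
    | none => exact absurd ((PySem.Dict.get?_eq_none_iff_not_mem_keys d0 "typeOf").1 h) (by simp [hT])
    | some v => exact ⟨v, rfl⟩
  have h4 : (((((d0.erase "measurementQualifier").erase "statType").erase "measuredProperty").erase
      "populationType")).get? "typeOf" = some val := by
    rw [get?_erase_of_ne _ _ _ (by decide), get?_erase_of_ne _ _ _ (by decide),
        get?_erase_of_ne _ _ _ (by decide), get?_erase_of_ne _ _ _ (by decide)]
    exact hval
  simp only [get_stat_var_id, get_stat_var_id_alt, addPV_eq, ← hd0]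
  simp only [PySem.Dict.pop?, h4, hval, Option.map_some]
  set d1 := d0.erase "typeOf" with hd1
  -- ---- A side: collapse the pop-as-you-go loop ----
  have hk5 : (((((d0.erase "measurementQualifier").erase "statType").erase "measuredProperty").erase
      "populationType").erase "typeOf").keys
      = d0.keys.filter (fun k => !(pvFixedL.contains k) && !(k == "typeOf")) := by
    rw [keys_erase, keys_erase, keys_erase, keys_erase, keys_erase]
    simp only [List.filter_filter]
    apply List.filter_congr
    intro x _
    by_cases h1 : x = "measurementQualifier" <;> by_cases h2 : x = "statType" <;>
      by_cases h3 : x = "measuredProperty" <;> by_cases h4 : x = "populationType" <;>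
      by_cases h5 : x = "typeOf" <;> simp [pvFixedL, h1, h2, h3, h4, h5]
  rw [hk5]
  have hndL : (PySem.List.sorted (d0.keys.filter (fun k =>
      !(pvFixedL.contains k) && !(k == "typeOf"))) (fun k => k) false).Nodup :=
    (PySem.List.sorted_perm _ _ _).symm.nodup (hnd0.filter _)
  have hxne : ∀ x ∈ (PySem.List.sorted (d0.keys.filter (fun k =>
      !(pvFixedL.contains k) && !(k == "typeOf"))) (fun k => k) false),
      x ≠ "measurementQualifier" ∧ x ≠ "statType" ∧ x ≠ "measuredProperty" ∧
      x ≠ "populationType" ∧ x ≠ "typeOf" := by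
    intro x hx
    have hm := (PySem.List.sorted_perm _ _ _).mem_iff.1 hx
    rw [List.mem_filter] at hm
    have hp := hm.2
    simp [pvFixedL] at hp
    tauto
  rw [loop_emit _ _ _ hndL]
  -- ---- B side: one emit pass over the sorted decorated items ----
  rw [PySem.List.foldl_congr_mem _ _ (fun acc kv => acc ++ emitI kv) _ (by
    intro acc kv _
    obtain ⟨k, v⟩ := kv
    cases v with
    | none => simp [emitI]
    | some v =>
      by_cases hc : (k == "statType" && v == "dcs:measuredValue") = true <;> simp [emitI, hc])]
  rw [PySem.List.foldl_append_eq_flatMap]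
  -- the sorted decorated item list is: present priority keys in rank order, then the rest
  have hnd1 : d1.keys.Nodup := by
    rw [hd1, keys_erase]; exact hnd0.filter _
  have hk1 : d1.keys = d0.keys.filter (fun x => !(x == "typeOf")) := by
    rw [hd1]; exact keys_erase d0 "typeOf"
  have hLperm : (pvFixedL.filter (fun k => d1.contains k) ++ (PySem.List.sorted
      (d0.keys.filter (fun k => !(pvFixedL.contains k) && !(k == "typeOf"))) (fun k => k) false)).Perm
      d1.keys := by
    have perm1 : (pvFixedL.filter (fun k => d1.contains k)).Perm
        (d1.keys.filter (fun k => pvFixedL.contains k)) := by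
      refine (List.perm_ext_iff_of_nodup ((by decide : pvFixedL.Nodup).filter _)
        (hnd1.filter _)).2 (fun a => ?_)
      simp only [List.mem_filter]
      constructor
      · rintro ⟨h1, h2⟩
        exact ⟨(mem_keys_iff_contains d1 a).1 h2, by simpa using h1⟩
      · rintro ⟨h1, h2⟩
        exact ⟨by simpa using h2, (mem_keys_iff_contains d1 a).2 h1⟩
    have perm2 : (PySem.List.sorted (d0.keys.filter (fun k =>
        !(pvFixedL.contains k) && !(k == "typeOf"))) (fun k => k) false).Perm
        (d1.keys.filter (fun k => !(pvFixedL.contains k))) := by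
      have he : d1.keys.filter (fun k => !(pvFixedL.contains k))
          = d0.keys.filter (fun k => !(pvFixedL.contains k) && !(k == "typeOf")) := by
        rw [hk1, List.filter_filter]
      rw [he]
      exact PySem.List.sorted_perm _ _ _
    exact (perm1.append perm2).trans (List.filter_append_perm _ d1.keys)
  have hck4 : ∀ x : String, x ≠ "measurementQualifier" → x ≠ "statType" →
      x ≠ "measuredProperty" → x ≠ "populationType" → ckey x = "4" ++ x := fun x a b c d =>
    ckey_rest x a b c d
  have hpwL : (pvFixedL.filter (fun k => d1.contains k) ++ (PySem.List.sorted
      (d0.keys.filter (fun k => !(pvFixedL.contains k) && !(k == "typeOf"))) (fun k => k)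
      false)).Pairwise (fun a b => ckey a < ckey b) := by
    refine List.pairwise_append.2 ⟨List.Pairwise.filter _ ckey_fix_pairwise, ?_, ?_⟩
    · have hle : (PySem.List.sorted (d0.keys.filter (fun k =>
          !(pvFixedL.contains k) && !(k == "typeOf"))) (fun k => k) false).Pairwise
          (fun a b => a ≤ b) := PySem.List.sorted_pairwise _ _
      have hlt := (hle.and hndL).imp (fun h => lt_of_le_of_ne h.1 h.2)
      refine hlt.imp_of_mem (fun {a b} ha hb hab => ?_)
      obtain ⟨a1, a2, a3, a4, _⟩ := hxne a ha
      obtain ⟨b1, b2, b3, b4, _⟩ := hxne b hb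
      exact ckey_rr a b (hck4 a a1 a2 a3 a4) (hck4 b b1 b2 b3 b4) hab
    · intro a ha b hb
      obtain ⟨b1, b2, b3, b4, _⟩ := hxne b hb
      exact ckey_fix_lt_rest a (List.mem_of_mem_filter ha) b (hck4 b b1 b2 b3 b4)
  have hsort : PySem.List.sorted d1.items (fun kv => pvRankD.getD kv.1 "4" ++ kv.1) false
      = (pvFixedL.filter (fun k => d1.contains k) ++ (PySem.List.sorted
        (d0.keys.filter (fun k => !(pvFixedL.contains k) && !(k == "typeOf"))) (fun k => k)
        false)).map (itemOf d1) := by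
    refine PySem.List.sorted_eq_of_perm_of_pairwise_lt _ _ _ ?_ ?_
    · rw [items_eq_map_itemOf d1 hnd1]
      exact hLperm.map _
    · exact List.pairwise_map.2 hpwL
  rw [hsort]
  rw [List.flatMap_map, List.flatMap_append]
  -- collapse the contains-filter: absent keys emit nothing anyway
  rw [flatMap_filter_of_nil pvFixedL _ _ (by
    intro x _ hc
    cases hg : d1.get? x with
    | none => exact emitI_absent d1 x hg
    | some v =>
      rw [PySem.Dict.contains_eq_isSome_get?, hg] at hc
      simp at hc)]
  -- emit of each priority key = what add_property_value_name appends for it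
  have eF : pvFixedL.flatMap (fun a => emitI (itemOf d1 a))
      = emitA d0 "measurementQualifier" none ++ (emitA d0 "statType" (some ["dcs:measuredValue"])
        ++ (emitA d0 "measuredProperty" none ++ emitA d0 "populationType" none)) := by
    simp only [pvFixedL, List.flatMap_cons, List.flatMap_nil, List.append_nil]
    rw [hd1, emitI_eq_nonstat d0 "measurementQualifier" (by decide) (by decide), emitI_eq_stat d0,
        emitI_eq_nonstat d0 "measuredProperty" (by decide) (by decide),
        emitI_eq_nonstat d0 "populationType" (by decide) (by decide)]
  rw [eF]
  -- rewrite A's emits over partially-erased dicts back to the original dict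
  have e2 : emitA (d0.erase "measurementQualifier") "statType" (some ["dcs:measuredValue"])
      = emitA d0 "statType" (some ["dcs:measuredValue"]) :=
    emitA_congr _ _ _ _ (get?_erase_of_ne _ _ _ (by decide))
  have e3 : emitA ((d0.erase "measurementQualifier").erase "statType") "measuredProperty" none
      = emitA d0 "measuredProperty" none :=
    emitA_congr _ _ _ _ (by
      rw [get?_erase_of_ne _ _ _ (by decide), get?_erase_of_ne _ _ _ (by decide)])
  have e4 : emitA (((d0.erase "measurementQualifier").erase "statType").erase "measuredProperty")
        "populationType" none = emitA d0 "populationType" none :=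
    emitA_congr _ _ _ _ (by
      rw [get?_erase_of_ne _ _ _ (by decide), get?_erase_of_ne _ _ _ (by decide),
          get?_erase_of_ne _ _ _ (by decide)])
  rw [e2, e3, e4]
  rw [List.flatMap_congr (g := fun k => emitA d0 k none) (fun x hx => (emitA_congr
      (((((d0.erase "measurementQualifier").erase "statType").erase "measuredProperty").erase
        "populationType").erase "typeOf") d0 x none (by
    obtain ⟨n1, n2, n3, n4, n5⟩ := hxne x hx
    rw [get?_erase_of_ne _ _ _ n5, get?_erase_of_ne _ _ _ n4, get?_erase_of_ne _ _ _ n3,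
        get?_erase_of_ne _ _ _ n2, get?_erase_of_ne _ _ _ n1])))]
  rw [List.flatMap_congr (f := fun a => emitI (itemOf d1 a)) (g := fun k => emitA d0 k none)
    (fun x hx => by
      obtain ⟨_, n2, _, _, n5⟩ := hxne x hx
      show emitI (itemOf d1 x) = emitA d0 x none
      rw [hd1]
      exact emitI_eq_nonstat d0 x n5 n2)]
  simp [List.append_assoc]
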